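-- pv_equiv track=rewrite | github.com/Shiv2157k/LeetCode2024 | solved_problems/string/count_binary_substrings.py | count_substrings_with_01_combinations_v0
-- ===== SOURCE A (Python) =====
-- def count_substrings_with_01_combinations_v0(s: str) -> int:
--     """
--     Approach: Group Together using array
--     T: O(N)
--     S: O(N)
--     :param s:
--     :return:
--     """
--
--     groups = [1]
--
--     for i in range(1, len(s)):
--         if s[i] != s[i - 1]:
--             groups.append(1)
--         else:
--             groups[-1] += 1
--
--     result = 0
--
--     for i in range(1, len(groups)):
--         result += min(groups[i - 1], groups[i])
--     return result
-- ===== SOURCE B (Python) =====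
-- def count_substrings_with_01_combinations_v0(s: str) -> int:
--     # Count each valid substring individually at its right endpoint: a valid
--     # substring ends at i iff the previous run is at least as long as the
--     # current run's prefix ending at i.  No run list, no min-summing.
--     prev, cur, res = 0, 0, 0
--     for i in range(len(s)):
--         if i > 0 and s[i] == s[i - 1]:
--             cur += 1
--         else:
--             prev, cur = cur, 1
--         if prev >= cur:
--             res += 1
--     return res
-- ===== Notes on version B (the rewrite author's own statement) =====
-- stated objective: alternative
-- what changed: Instead of building the run-length array and summing minima of adjacent runs, B counts each valid substring individually at its right endpoint: it keeps the previous and current run lengths and adds 1 whenever the previous run is at least as long as the current one, so no run list and no min is ever computed.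
import Mathlib
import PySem

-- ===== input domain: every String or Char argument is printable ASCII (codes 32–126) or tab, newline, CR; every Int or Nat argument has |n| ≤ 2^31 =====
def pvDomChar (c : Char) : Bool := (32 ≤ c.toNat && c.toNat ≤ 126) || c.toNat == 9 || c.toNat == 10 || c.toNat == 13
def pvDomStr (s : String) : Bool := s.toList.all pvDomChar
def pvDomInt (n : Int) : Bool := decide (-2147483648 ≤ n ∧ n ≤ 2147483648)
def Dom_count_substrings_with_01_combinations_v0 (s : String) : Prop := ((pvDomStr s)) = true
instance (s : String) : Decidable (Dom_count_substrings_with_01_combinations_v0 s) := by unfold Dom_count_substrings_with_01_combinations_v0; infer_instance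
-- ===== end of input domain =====

-- B replaces A's run-length-array-then-sum-of-adjacent-minima structure by counting each
-- valid substring individually at its right endpoint (add 1 whenever the previous run is at
-- least as long as the current one); no run list and no min computed (objective: alternative).

-- ===== PORT A =====
-- groups[-1] += 1 : increment the last element of the list
def pvIncLast : List Int → List Int
  | [] => []
  | [x] => [x + 1]
  | x :: y :: t => x :: pvIncLast (y :: t)

def count_substrings_with_01_combinations_v0 (s : String) : Int :=
  let cs := s.toList
  let groups := (PySem.List.pyRange 1 (cs.length : Int) 1).foldl
    (fun groups i =>
      if PySem.List.pyGetD cs i ' ' ≠ PySem.List.pyGetD cs (i - 1) ' '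
      then groups ++ [(1 : Int)]
      else pvIncLast groups) [1]
  (PySem.List.pyRange 1 (groups.length : Int) 1).foldl
    (fun result i =>
      result + min (PySem.List.pyGetD groups (i - 1) 0) (PySem.List.pyGetD groups i 0)) 0

-- ===== PORT B =====
-- the body of Source B's loop: the two sequential ifs over state (prev, cur, res)
def pvBStep (cs : List Char) (st : Int × Int × Int) (i : Int) : Int × Int × Int :=
  let st1 := if 0 < i ∧ PySem.List.pyGetD cs i ' ' = PySem.List.pyGetD cs (i - 1) ' '
    then (st.1, st.2.1 + 1, st.2.2)
    else (st.2.1, (1 : Int), st.2.2)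
  if st1.1 ≥ st1.2.1 then (st1.1, st1.2.1, st1.2.2 + 1) else st1

def count_substrings_with_01_combinations_v0_alt (s : String) : Int :=
  let cs := s.toList
  let st := (PySem.List.pyRange 0 (cs.length : Int) 1).foldl (pvBStep cs) ((0 : Int), (0 : Int), (0 : Int))
  st.2.2

-- ===== PRECONDITION & SPEC =====
def Spec_count_substrings_with_01_combinations_v0 (s : String) (out : Int) : Prop := out = count_substrings_with_01_combinations_v0_alt s
instance (s : String) (out : Int) : Decidable (Spec_count_substrings_with_01_combinations_v0 s out) := by unfold Spec_count_substrings_with_01_combinations_v0; infer_instance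

-- ===== CLAIM (what is proved, stated in full; the proofs are below) =====
def Claim_equal_count_substrings_with_01_combinations_v0 : Prop := ∀ (s : String), Dom_count_substrings_with_01_combinations_v0 s → Spec_count_substrings_with_01_combinations_v0 s (count_substrings_with_01_combinations_v0 s)

-- ===== LEMMAS AND PROOFS =====

-- sum of minima of adjacent elements
def adjSum : List Int → Int
  | [] => 0
  | [_] => 0
  | x :: y :: t => min x y + adjSum (y :: t)

lemma pvIncLast_append (h : List Int) (c : Int) : pvIncLast (h ++ [c]) = h ++ [c + 1] := by
  induction h with
  | nil => rfl
  | cons a t ih =>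
    cases t with
    | nil => rfl
    | cons b u => simpa [pvIncLast] using ih

lemma adjSum_append (h : List Int) (x : Int) :
    adjSum (h ++ [x]) = adjSum h + (if h = [] then 0 else min (h.getLastD 0) x) := by
  induction h with
  | nil => simp [adjSum]
  | cons a t ih =>
    cases t with
    | nil => simp [adjSum]
    | cons b u =>
      simp only [List.cons_append, adjSum] at *
      rw [ih]
      simp only [List.cons_ne_nil, reduceIte,
        List.getLastD_eq_getLast?, List.getLast?_cons_cons]
      ring

lemma pvBStep_of_eq (cs : List Char) (st : Int × Int × Int) (i : Int) (h0 : 0 < i)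
    (hc : PySem.List.pyGetD cs i ' ' = PySem.List.pyGetD cs (i - 1) ' ') :
    pvBStep cs st i = if st.1 ≥ st.2.1 + 1 then (st.1, st.2.1 + 1, st.2.2 + 1)
      else (st.1, st.2.1 + 1, st.2.2) := by
  simp [pvBStep, h0, hc]

lemma pvBStep_of_ne (cs : List Char) (st : Int × Int × Int) (i : Int) (hcur : 1 ≤ st.2.1)
    (hc : ¬ PySem.List.pyGetD cs i ' ' = PySem.List.pyGetD cs (i - 1) ' ') :
    pvBStep cs st i = (st.2.1, 1, st.2.2 + 1) := by
  have : ¬ (0 < i ∧ PySem.List.pyGetD cs i ' ' = PySem.List.pyGetD cs (i - 1) ' ') :=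
    fun hand => hc hand.2
  simp only [pvBStep, if_neg this]
  rw [if_pos (by simpa using hcur)]

-- invariant tying A's groups fold to B's (prev, cur, res) fold over range(1, n)
lemma loop_rel (cs : List Char) (n : Nat) :
    ∃ h : List Int,
      (PySem.List.pyRange 1 (n : Int) 1).foldl
        (fun groups i =>
          if PySem.List.pyGetD cs i ' ' ≠ PySem.List.pyGetD cs (i - 1) ' '
          then groups ++ [(1 : Int)]
          else pvIncLast groups) [1]
      = h ++ [((PySem.List.pyRange 1 (n : Int) 1).foldl (pvBStep cs) ((0 : Int), (1 : Int), (0 : Int))).2.1]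
      ∧ ((PySem.List.pyRange 1 (n : Int) 1).foldl (pvBStep cs) ((0 : Int), (1 : Int), (0 : Int))).1 = h.getLastD 0
      ∧ ((PySem.List.pyRange 1 (n : Int) 1).foldl (pvBStep cs) ((0 : Int), (1 : Int), (0 : Int))).2.2
        = adjSum h + min (h.getLastD 0)
            ((PySem.List.pyRange 1 (n : Int) 1).foldl (pvBStep cs) ((0 : Int), (1 : Int), (0 : Int))).2.1
      ∧ 1 ≤ ((PySem.List.pyRange 1 (n : Int) 1).foldl (pvBStep cs) ((0 : Int), (1 : Int), (0 : Int))).2.1 := by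
  induction n with
  | zero =>
    refine ⟨[], ?_⟩
    rw [PySem.List.pyRange_one_eq_nil (by norm_num)]
    simp [adjSum]
  | succ m ih =>
    by_cases hm : m = 0
    · subst hm
      refine ⟨[], ?_⟩
      rw [PySem.List.pyRange_one_eq_nil (by norm_num)]
      simp [adjSum]
    · obtain ⟨h, hg, hprev, hres, hcur⟩ := ih
      have hsplit : PySem.List.pyRange 1 ((m + 1 : Nat) : Int) 1
          = PySem.List.pyRange 1 (m : Int) 1 ++ [(m : Int)] := by
        push_cast
        exact PySem.List.pyRange_one_succ_right (by exact_mod_cast Nat.one_le_iff_ne_zero.mpr hm)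
      rw [hsplit]
      simp only [List.foldl_append, List.foldl_cons, List.foldl_nil]
      rw [hg]
      set st := (PySem.List.pyRange 1 (m : Int) 1).foldl (pvBStep cs) ((0 : Int), (1 : Int), (0 : Int)) with hst
      have hm0 : (0 : Int) < (m : Int) := by exact_mod_cast Nat.pos_of_ne_zero hm
      by_cases hc : PySem.List.pyGetD cs (m : Int) ' ' = PySem.List.pyGetD cs ((m : Int) - 1) ' '
      · -- same char: run continues
        rw [if_neg (not_ne_iff.mpr hc), pvBStep_of_eq cs st (m : Int) hm0 hc]
        by_cases hge : st.1 ≥ st.2.1 + 1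
        · rw [if_pos hge]
          exact ⟨h, by rw [pvIncLast_append], hprev,
            by simp only []; rw [hres, hprev] at *; omega,
            by simp only []; omega⟩
        · rw [if_neg hge]
          exact ⟨h, by rw [pvIncLast_append], hprev,
            by simp only []; rw [hres, hprev] at *; omega,
            by simp only []; omega⟩
      · -- different char: new run starts
        rw [if_pos hc, pvBStep_of_ne cs st (m : Int) hcur hc]
        refine ⟨h ++ [st.2.1], rfl, by simp, ?_, by norm_num⟩
        simp only [List.getLastD_concat]
        rw [adjSum_append, hres, hprev] at *
        rcases h with _ | ⟨a, t⟩
        · simp only [List.getLastD_nil, reduceIte] at *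
          omega
        · simp only [List.cons_ne_nil, reduceIte] at *
          omega

-- A's second loop computes adjSum
lemma second_loop (g : List Int) :
    (PySem.List.pyRange 1 (g.length : Int) 1).foldl
      (fun result i =>
        result + min (PySem.List.pyGetD g (i - 1) 0) (PySem.List.pyGetD g i 0)) 0 = adjSum g := by
  induction g using List.reverseRecOn with
  | nil => rw [PySem.List.pyRange_one_eq_nil (by norm_num)]; rfl
  | append_singleton h x ih =>
    rcases eq_or_ne h [] with rfl | hne
    · rw [show ((([] : List Int) ++ [x]).length : Int) = 1 by simp,
        PySem.List.pyRange_one_eq_nil (by norm_num)]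
      simp [adjSum]
    · have hlen : 1 ≤ h.length := List.length_pos_iff.mpr hne
      have hsplit : PySem.List.pyRange 1 ((h ++ [x]).length : Int) 1
          = PySem.List.pyRange 1 (h.length : Int) 1 ++ [(h.length : Int)] := by
        rw [show ((h ++ [x]).length : Int) = (h.length : Int) + 1 by simp]
        exact PySem.List.pyRange_one_succ_right (by exact_mod_cast hlen)
      rw [hsplit]
      simp only [List.foldl_append, List.foldl_cons, List.foldl_nil]
      have hcongr : (PySem.List.pyRange 1 (h.length : Int) 1).foldl
          (fun result i =>
            result + min (PySem.List.pyGetD (h ++ [x]) (i - 1) 0) (PySem.List.pyGetD (h ++ [x]) i 0)) 0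
          = (PySem.List.pyRange 1 (h.length : Int) 1).foldl
          (fun result i =>
            result + min (PySem.List.pyGetD h (i - 1) 0) (PySem.List.pyGetD h i 0)) 0 := by
        refine PySem.List.foldl_congr_mem _ _ _ _ (fun acc i hi => ?_)
        have hib := (PySem.List.mem_pyRange_one).1 hi
        have h1 : PySem.List.pyGetD (h ++ [x]) (i - 1) 0 = PySem.List.pyGetD h (i - 1) 0 := by
          rw [PySem.List.pyGetD_eq_getElem (h ++ [x]) 0 (by omega) (by simp only [List.length_append, List.length_cons, List.length_nil]; omega),
              PySem.List.pyGetD_eq_getElem h 0 (by omega) (by omega)]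
          exact List.getElem_append_left (by omega)
        have h2 : PySem.List.pyGetD (h ++ [x]) i 0 = PySem.List.pyGetD h i 0 := by
          rw [PySem.List.pyGetD_eq_getElem (h ++ [x]) 0 (by omega) (by simp only [List.length_append, List.length_cons, List.length_nil]; omega),
              PySem.List.pyGetD_eq_getElem h 0 (by omega) (by omega)]
          exact List.getElem_append_left (by omega)
        rw [h1, h2]
      rw [hcongr, ih]
      have hx : PySem.List.pyGetD (h ++ [x]) (h.length : Int) 0 = x := by
        rw [PySem.List.pyGetD_eq_getElem (h ++ [x]) 0 (by positivity) (by simp only [List.length_append, List.length_cons, List.length_nil]; omega)]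
        simp
      have hl : PySem.List.pyGetD (h ++ [x]) ((h.length : Int) - 1) 0 = h.getLastD 0 := by
        rw [PySem.List.pyGetD_eq_getElem (h ++ [x]) 0 (by omega) (by simp only [List.length_append, List.length_cons, List.length_nil]; omega)]
        simp only [show ((h.length : Int) - 1).toNat = h.length - 1 from by omega]
        rw [List.getElem_append_left (by omega), List.getLastD_eq_getLast?,
          List.getLast?_eq_getElem?,
          List.getElem?_eq_getElem (by omega : h.length - 1 < h.length)]
        rfl
      rw [adjSum_append, hx, hl, if_neg hne]

lemma final_eq (cs : List Char) :
    (PySem.List.pyRange 1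
        (((PySem.List.pyRange 1 (cs.length : Int) 1).foldl
            (fun groups i =>
              if PySem.List.pyGetD cs i ' ' ≠ PySem.List.pyGetD cs (i - 1) ' '
              then groups ++ [(1 : Int)]
              else pvIncLast groups) [1]).length : Int) 1).foldl
      (fun result i =>
        result + min (PySem.List.pyGetD ((PySem.List.pyRange 1 (cs.length : Int) 1).foldl
            (fun groups i =>
              if PySem.List.pyGetD cs i ' ' ≠ PySem.List.pyGetD cs (i - 1) ' '
              then groups ++ [(1 : Int)]
              else pvIncLast groups) [1]) (i - 1) 0)
          (PySem.List.pyGetD ((PySem.List.pyRange 1 (cs.length : Int) 1).foldl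
            (fun groups i =>
              if PySem.List.pyGetD cs i ' ' ≠ PySem.List.pyGetD cs (i - 1) ' '
              then groups ++ [(1 : Int)]
              else pvIncLast groups) [1]) i 0)) 0
    = ((PySem.List.pyRange 0 (cs.length : Int) 1).foldl (pvBStep cs) ((0 : Int), (0 : Int), (0 : Int))).2.2 := by
  rw [second_loop]
  rcases Nat.eq_zero_or_pos cs.length with hz | hpos
  · rw [hz]
    simp only [Nat.cast_zero, PySem.List.pyRange_one_eq_nil (le_refl (0 : Int)),
      PySem.List.pyRange_one_eq_nil (by norm_num : (0 : Int) ≤ 1), List.foldl_nil]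
    rfl
  · have hcons : PySem.List.pyRange 0 (cs.length : Int) 1
        = (0 : Int) :: PySem.List.pyRange 1 (cs.length : Int) 1 := by
      simpa using PySem.List.pyRange_one_cons (by exact_mod_cast hpos : (0 : Int) < (cs.length : Int))
    have hstep0 : pvBStep cs ((0 : Int), (0 : Int), (0 : Int)) 0 = ((0 : Int), (1 : Int), (0 : Int)) := by
      norm_num [pvBStep]
    rw [hcons, List.foldl_cons, hstep0]
    obtain ⟨h, hg, hprev, hres, hcur⟩ := loop_rel cs cs.length
    rw [hg, adjSum_append, hres]
    rcases eq_or_ne h [] with rfl | hne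
    · simp only [List.getLastD_nil, reduceIte, adjSum]
      omega
    · rw [if_neg hne]

-- ===== VERDICT (by name: the statement is the Claim_ definition above) =====
theorem count_substrings_with_01_combinations_v0_spec : Claim_equal_count_substrings_with_01_combinations_v0 := by
  intro s _
  unfold Spec_count_substrings_with_01_combinations_v0
  simp only [count_substrings_with_01_combinations_v0, count_substrings_with_01_combinations_v0_alt]
  exact final_eq s.toList
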